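-- pv_equiv track=rewrite | github.com/Abdulmohseng/6156-Agent-Project | eval/judge.py | _format_ground_truth_structure
-- ===== SOURCE A (Python) =====
-- def _format_ground_truth_structure(gt: dict) -> str:
--     by_folder: dict[str, list[str]] = {}
--     for fname, entry in gt["files"].items():
--         folder = entry["expected_folder"]
--         by_folder.setdefault(folder, []).append(fname)
--     lines = []
--     for folder, files in sorted(by_folder.items()):
--         lines.append(f"{folder}/")
--         for f in sorted(files):
--             lines.append(f"  {f}")
--     return "\n".join(lines)
-- ===== SOURCE B (Python) =====
-- def _format_ground_truth_structure(gt: dict) -> str: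
--     pairs = sorted(
--         (entry["expected_folder"], fname) for fname, entry in gt["files"].items()
--     )
--     lines = []
--     prev = None
--     for folder, fname in pairs:
--         if prev != folder:
--             lines.append(folder + "/")
--             prev = folder
--         lines.append("  " + fname)
--     return "\n".join(lines)
-- ===== Notes on version B (the rewrite author's own statement) =====
-- stated objective: alternative
-- what changed: Replaces dict-of-lists accumulation followed by an outer sort of the groups and a per-group inner sort with one global sort of (folder, fname) pairs and a single sequential grouping pass that emits a header line whenever the folder changes.
import Mathlib
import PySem

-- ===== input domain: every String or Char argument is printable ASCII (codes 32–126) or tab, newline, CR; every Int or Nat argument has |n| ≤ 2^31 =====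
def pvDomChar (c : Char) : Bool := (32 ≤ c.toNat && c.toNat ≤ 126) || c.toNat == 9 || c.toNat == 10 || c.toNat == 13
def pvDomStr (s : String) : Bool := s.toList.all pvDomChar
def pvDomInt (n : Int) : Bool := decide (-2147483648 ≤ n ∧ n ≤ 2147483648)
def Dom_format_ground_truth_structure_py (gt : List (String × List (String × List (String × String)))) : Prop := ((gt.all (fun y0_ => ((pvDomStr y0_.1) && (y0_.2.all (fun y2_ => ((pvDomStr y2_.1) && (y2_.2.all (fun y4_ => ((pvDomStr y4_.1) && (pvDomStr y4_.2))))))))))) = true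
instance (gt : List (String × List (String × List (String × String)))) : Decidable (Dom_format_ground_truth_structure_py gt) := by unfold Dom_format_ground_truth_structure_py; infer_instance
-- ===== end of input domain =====

-- B replaces dict-of-lists accumulation plus two nested sorts by one global sort of
-- (folder, fname) pairs followed by a single sequential grouping pass (objective: alternative).


-- ===== PORT A =====
-- gt["files"] and entry["expected_folder"] are dict lookups that raise KeyError when the key
-- is missing; Pre_ excludes exactly those inputs, so the total getD forms are exact here.
-- sorted(by_folder.items()) compares (folder, files) tuples, but the folders (dict keys) are
-- pairwise distinct, so the second component is never consulted: sorting by the folder alone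
-- is exact.
def format_ground_truth_structure_py (gt : List (String × List (String × List (String × String)))) : String :=
  let files : PySem.Dict String (List (String × String)) :=
    PySem.Dict.ofList ((PySem.Dict.ofList gt).getD "files" [])
  let by_folder : PySem.Dict String (List String) :=
    files.items.foldl
      (fun d p =>
        d.modify ((PySem.Dict.ofList p.2).getD "expected_folder" "") [] (fun fs => fs ++ [p.1]))
      PySem.Dict.empty
  let lines : List String :=
    (PySem.List.sorted by_folder.items (fun q => q.1) false).foldl
      (fun lines q =>
        (PySem.List.sorted q.2 (fun x => x) false).foldl
          (fun ls f => ls ++ ["  " ++ f]) (lines ++ [q.1 ++ "/"]))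
      []
  PySem.Str.join "\n" lines

-- ===== PORT B =====
def format_ground_truth_structure_py_alt (gt : List (String × List (String × List (String × String)))) : String :=
  let files : PySem.Dict String (List (String × String)) :=
    PySem.Dict.ofList ((PySem.Dict.ofList gt).getD "files" [])
  let pairs : List (String × String) :=
    PySem.List.sorted2
      (files.items.map (fun p => ((PySem.Dict.ofList p.2).getD "expected_folder" "", p.1)))
      (fun q => q.1) (fun q => q.2) false
  let st : List String × Option String :=
    pairs.foldl
      (fun st q =>
        if st.2 ≠ some q.1 then (st.1 ++ [q.1 ++ "/", "  " ++ q.2], some q.1)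
        else (st.1 ++ ["  " ++ q.2], st.2))
      ([], none)
  PySem.Str.join "\n" st.1

-- ===== PRECONDITION & SPEC =====
-- Pre_ excludes exactly the inputs on which the Python raises KeyError: gt lacking the key
-- "files", or some file entry lacking the key "expected_folder" (B raises there too).
def Pre_format_ground_truth_structure_py (gt : List (String × List (String × List (String × String)))) : Prop :=
  (PySem.Dict.ofList gt).contains "files" = true ∧
  ∀ p ∈ (PySem.Dict.ofList ((PySem.Dict.ofList gt).getD "files" [])).items,
    (PySem.Dict.ofList p.2).contains "expected_folder" = true
instance (gt : List (String × List (String × List (String × String)))) : Decidable (Pre_format_ground_truth_structure_py gt) := by unfold Pre_format_ground_truth_structure_py; infer_instance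

def pvWitness_format_ground_truth_structure_py : (List (String × List (String × List (String × String)))) :=
  [("files", [("a.txt", [("expected_folder", "src")]), ("b.txt", [("expected_folder", "docs")])])]

def Spec_format_ground_truth_structure_py (gt : List (String × List (String × List (String × String)))) (out : String) : Prop := out = format_ground_truth_structure_py_alt gt
instance (gt : List (String × List (String × List (String × String)))) (out : String) : Decidable (Spec_format_ground_truth_structure_py gt out) := by unfold Spec_format_ground_truth_structure_py; infer_instance

-- ===== CLAIM (what is proved, stated in full; the proofs are below) =====
def Claim_equal_format_ground_truth_structure_py : Prop := ∀ (gt : List (String × List (String × List (String × String)))), Dom_format_ground_truth_structure_py gt → Pre_format_ground_truth_structure_py gt → Spec_format_ground_truth_structure_py gt (format_ground_truth_structure_py gt)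

-- ===== LEMMAS AND PROOFS =====

def pvLtp (a b : String × String) : Bool :=
  decide (a.1 < b.1) || (!decide (b.1 < a.1) && decide (a.2 < b.2))

theorem pvLtp_trans {a b c : String × String} (h1 : pvLtp a b = true) (h2 : pvLtp b c = true) :
    pvLtp a c = true := by
  simp only [pvLtp, Bool.or_eq_true, Bool.and_eq_true, Bool.not_eq_eq_eq_not, Bool.not_true,
    decide_eq_true_eq, decide_eq_false_iff_not, not_lt] at *
  rcases h1 with h1 | ⟨h1a, h1b⟩ <;> rcases h2 with h2 | ⟨h2a, h2b⟩
  · exact Or.inl (lt_trans h1 h2)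
  · exact Or.inl (lt_of_lt_of_le h1 h2a)
  · exact Or.inl (lt_of_le_of_lt h1a h2)
  · exact Or.inr ⟨le_trans h1a h2a, lt_trans h1b h2b⟩

theorem pvLtp_asymm {a b : String × String} (h1 : pvLtp a b = true) (h2 : pvLtp b a = true) :
    False := by
  simp only [pvLtp, Bool.or_eq_true, Bool.and_eq_true, Bool.not_eq_eq_eq_not, Bool.not_true,
    decide_eq_true_eq, decide_eq_false_iff_not, not_lt] at *
  rcases h1 with h1 | ⟨h1a, h1b⟩ <;> rcases h2 with h2 | ⟨h2a, h2b⟩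
  · exact absurd h2 (not_lt.mpr (le_of_lt h1))
  · exact absurd h1 (not_lt.mpr h2a)
  · exact absurd h2 (not_lt.mpr h1a)
  · exact absurd h2b (not_lt.mpr (le_of_lt h1b))


theorem pv_insertBy_pairwise (x : String × String) (acc : List (String × String))
    (hacc : acc.Pairwise (fun a b => pvLtp a b = true))
    (htot : ∀ y ∈ acc, pvLtp x y = true ∨ pvLtp y x = true) :
    (PySem.List.insertBy pvLtp x acc).Pairwise (fun a b => pvLtp a b = true) := by
  induction acc with
  | nil => simp [PySem.List.insertBy]
  | cons y t ih =>
    by_cases hxy : pvLtp x y = true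
    · rw [show PySem.List.insertBy pvLtp x (y :: t) = x :: y :: t from by
        simp [PySem.List.insertBy, hxy]]
      refine List.Pairwise.cons ?_ hacc
      intro z hz
      rcases List.mem_cons.mp hz with rfl | hz
      · exact hxy
      · exact pvLtp_trans hxy (List.rel_of_pairwise_cons hacc hz)
    · rw [show PySem.List.insertBy pvLtp x (y :: t) = y :: PySem.List.insertBy pvLtp x t from by
        simp [PySem.List.insertBy, hxy]]
      refine List.Pairwise.cons ?_ (ih hacc.tail (fun z hz => htot z (List.mem_cons_of_mem _ hz)))
      intro z hz
      rw [PySem.List.mem_insertBy] at hz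
      rcases hz with rfl | hz
      · rcases htot y (by simp) with h | h
        · exact absurd h hxy
        · exact h
      · exact List.rel_of_pairwise_cons hacc hz

theorem pv_foldl_insertBy_pairwise (xs : List (String × String)) :
    ∀ (acc : List (String × String)),
    acc.Pairwise (fun a b => pvLtp a b = true) →
    (∀ x ∈ xs, ∀ y ∈ acc, pvLtp x y = true ∨ pvLtp y x = true) →
    xs.Pairwise (fun a b => pvLtp a b = true ∨ pvLtp b a = true) →
    (xs.foldl (fun acc x => PySem.List.insertBy pvLtp x acc) acc).Pairwise
      (fun a b => pvLtp a b = true) := by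
  induction xs with
  | nil => intro acc h _ _; simpa using h
  | cons x t ih =>
    intro acc hacc htot hpw
    simp only [List.foldl_cons]
    refine ih _ (pv_insertBy_pairwise x acc hacc (htot x List.mem_cons_self)) ?_ hpw.tail
    intro z hz y hy
    rw [PySem.List.mem_insertBy] at hy
    rcases hy with rfl | hy
    · exact (List.rel_of_pairwise_cons hpw hz).symm
    · exact htot z (List.mem_cons_of_mem _ hz) y hy

theorem pv_sorted2_eq (L ys : List (String × String)) (hperm : ys.Perm L)
    (hpw : ys.Pairwise (fun a b => pvLtp a b = true)) :
    PySem.List.sorted2 L (fun q => q.1) (fun q => q.2) false = ys := by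
  have hfold : PySem.List.sorted2 L (fun q => q.1) (fun q => q.2) false
      = L.foldl (fun acc x => PySem.List.insertBy pvLtp x acc) [] := rfl
  have hR : L.Pairwise (fun a b => pvLtp a b = true ∨ pvLtp b a = true) := by
    refine (List.Perm.pairwise_iff ?_ hperm).mp (hpw.imp Or.inl)
    intro a b h; exact h.symm.imp id id  -- symmetry
  have hsorted := pv_foldl_insertBy_pairwise L [] (by simp) (by simp) hR
  rw [hfold]
  refine List.Perm.eq_of_pairwise ?_ hsorted hpw ?_
  · intro a b _ _ h1 h2; exact absurd h2 (fun h => pvLtp_asymm h1 h)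
  · exact ((PySem.List.foldl_insertBy_perm pvLtp L []).trans (by simp)).trans hperm.symm

def pvGfold (L : List (String × String)) : PySem.Dict String (List String) :=
  L.foldl (fun d q => d.modify q.1 [] (fun fs => fs ++ [q.2])) PySem.Dict.empty

def pvKeysOf (L : List (String × String)) : List String := PySem.List.dedup (L.map (fun q => q.1))

def pvGp (L : List (String × String)) (f : String) : List String :=
  (L.filter (fun q => q.1 == f)).map (fun q => q.2)

theorem pvKeysOf_nodup (L : List (String × String)) : (pvKeysOf L).Nodup :=
  PySem.Set.nodup_ofList _

theorem pvKeysOf_mem (L : List (String × String)) (f : String) :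
    f ∈ pvKeysOf L ↔ f ∈ L.map (fun q => q.1) :=
  PySem.Set.mem_ofList _ _

theorem pvKeysOf_append (L : List (String × String)) (q : String × String) :
    pvKeysOf (L ++ [q]) =
      if q.1 ∈ pvKeysOf L then pvKeysOf L else pvKeysOf L ++ [q.1] := by
  unfold pvKeysOf PySem.List.dedup
  rw [List.map_append, PySem.Set.ofList_eq_foldl, List.foldl_append,
    ← PySem.Set.ofList_eq_foldl]
  simp only [List.map_cons, List.map_nil, List.foldl_cons, List.foldl_nil]
  unfold PySem.Set.add
  by_cases h : q.1 ∈ PySem.Set.ofList (L.map (fun q => q.1))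
  · simp [h]
  · simp [h]

theorem pvGp_append (L : List (String × String)) (q : String × String) (f : String) :
    pvGp (L ++ [q]) f = pvGp L f ++ (if q.1 = f then [q.2] else []) := by
  unfold pvGp
  rw [List.filter_append, List.map_append]
  by_cases h : q.1 = f <;> simp [h]

theorem pvGfold_items (L : List (String × String)) :
    (pvGfold L).items = (pvKeysOf L).map (fun f => (f, pvGp L f)) := by
  induction L using List.reverseRecOn with
  | nil => simp [pvGfold, pvKeysOf, pvGp, PySem.List.dedup, PySem.Set.ofList, PySem.Set.empty,
      PySem.Dict.empty]
  | append_singleton L q ih =>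
    have hkeys : (pvGfold L).keys = pvKeysOf L := by
      show (pvGfold L).items.map (fun x => x.1) = _
      rw [ih, List.map_map]; exact List.map_id _
    have hnodup : (pvGfold L).keys.Nodup := by rw [hkeys]; exact pvKeysOf_nodup L
    have hfold : pvGfold (L ++ [q]) = (pvGfold L).modify q.1 [] (fun fs => fs ++ [q.2]) := by
      unfold pvGfold; rw [List.foldl_append]; rfl
    rw [hfold, PySem.Dict.modify, pvKeysOf_append]
    by_cases hmem : q.1 ∈ pvKeysOf L
    · have hitem : (q.1, pvGp L q.1) ∈ (pvGfold L).items := by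
        rw [ih]; exact List.mem_map_of_mem hmem
      have hget : (pvGfold L).getD q.1 [] = pvGp L q.1 :=
        PySem.Dict.getD_of_mem_items _ hitem hnodup []
      have hcont : (pvGfold L).contains q.1 = true := by
        rw [PySem.Dict.contains_iff_mem_keys, hkeys]; exact hmem
      rw [PySem.Dict.items_insert_of_contains _ _ hcont, ih, hget, if_pos hmem, List.map_map]
      refine List.map_congr_left ?_
      intro f _
      by_cases hf : f = q.1
      · subst hf; simp [pvGp_append]
      · have hne : (f == q.1) = false := by simp [hf]
        simp [Function.comp, hne, pvGp_append, (Ne.symm hf : q.1 ≠ f)]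
    · have hget : (pvGfold L).getD q.1 [] = [] := by
        unfold PySem.Dict.getD
        rw [(PySem.Dict.get?_eq_none_iff_not_mem_keys _ _).mpr (by rw [hkeys]; exact hmem)]
        rfl
      have hcont : (pvGfold L).contains q.1 = false := by
        rw [← Bool.not_eq_true, PySem.Dict.contains_iff_mem_keys, hkeys]; exact hmem
      have hgpq : pvGp L q.1 = [] := by
        unfold pvGp
        have hfil : List.filter (fun p => p.1 == q.1) L = [] := by
          rw [List.filter_eq_nil_iff]
          intro p hp hq
          have hq1 : p.1 = q.1 := by simpa using hq
          exact hmem ((pvKeysOf_mem L q.1).mpr (hq1 ▸ List.mem_map_of_mem hp))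
        rw [hfil]; rfl
      rw [PySem.Dict.items_insert_of_not_contains _ _ hcont, ih, hget, if_neg hmem,
        List.map_append]
      congr 1
      · refine List.map_congr_left ?_
        intro f hf
        have : q.1 ≠ f := fun h => hmem (h ▸ hf)
        simp [pvGp_append, this]
      · simp [pvGp_append, hgpq]

-- small pvLtp constructors
theorem pvLtp_of_fst {a b : String × String} (h : a.1 < b.1) : pvLtp a b = true := by
  simp [pvLtp, h]

theorem pvLtp_of_snd {a b : String × String} (h1 : a.1 = b.1) (h2 : a.2 < b.2) :
    pvLtp a b = true := by
  simp [pvLtp, h1, h2]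

def pvSK (L : List (String × String)) : List String :=
  PySem.List.sorted (pvKeysOf L) (fun x => x) false

def pvWs (L : List (String × String)) (f : String) : List String :=
  PySem.List.sorted (pvGp L f) (fun x => x) false

theorem pvSK_pairwise (L : List (String × String)) : (pvSK L).Pairwise (· < ·) :=
  PySem.List.sorted_ofList_pairwise_lt (L.map (fun q => q.1))

theorem pv_pairwise_lt_of_nodup (xs : List String) (h : xs.Nodup) :
    (PySem.List.sorted xs (fun x => x) false).Pairwise (· < ·) := by
  have h1 := PySem.List.sorted_pairwise xs (fun x => x)
  have h2 : (PySem.List.sorted xs (fun x => x) false).Nodup :=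
    ((PySem.List.sorted_perm xs (fun x => x) false).nodup_iff).mpr h
  exact (h1.and h2).imp (fun h => lt_of_le_of_ne h.1 h.2)

theorem pvGp_nodup (L : List (String × String)) (h : (L.map (fun q => q.2)).Nodup)
    (f : String) : (pvGp L f).Nodup := by
  unfold pvGp
  exact h.sublist (List.Sublist.map _ List.filter_sublist)

theorem pvWs_pairwise (L : List (String × String)) (h : (L.map (fun q => q.2)).Nodup)
    (f : String) : (pvWs L f).Pairwise (· < ·) :=
  pv_pairwise_lt_of_nodup _ (pvGp_nodup L h f)

-- sorted(by_folder.items()) named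
theorem pv_sortedItems (L : List (String × String)) :
    PySem.List.sorted (pvGfold L).items (fun q => q.1) false
      = (pvSK L).map (fun f => (f, pvGp L f)) := by
  refine PySem.List.sorted_eq_of_perm_of_pairwise_lt _ _ _ ?_ ?_
  · rw [pvGfold_items]
    exact (PySem.List.sorted_perm (pvKeysOf L) (fun x => x) false).map _
  · exact (pvSK_pairwise L).map _ (fun a b h => h)

-- A's emission loop as a flatMap
theorem pv_linesA_fold (ks : List String) (G : String → List String) :
    ∀ acc : List String,
    (ks.map (fun f => (f, G f))).foldl
      (fun lines q =>
        (PySem.List.sorted q.2 (fun x => x) false).foldl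
          (fun ls f => ls ++ ["  " ++ f]) (lines ++ [q.1 ++ "/"]))
      acc
    = acc ++ ks.flatMap
        (fun f => (f ++ "/") :: (PySem.List.sorted (G f) (fun x => x) false).map
          (fun s => "  " ++ s)) := by
  induction ks with
  | nil => intro acc; simp
  | cons f t ih =>
    intro acc
    simp only [List.map_cons, List.foldl_cons, List.flatMap_cons]
    rw [PySem.List.foldl_append_singleton_eq_map, ih]
    simp

-- gp with its folder restored is the filtered list
theorem pvGp_repair (L : List (String × String)) (f : String) :
    (pvGp L f).map (fun s => (f, s)) = L.filter (fun q => q.1 == f) := by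
  unfold pvGp
  rw [List.map_map]
  have : ∀ q ∈ L.filter (fun q => q.1 == f),
      ((fun s => (f, s)) ∘ fun q : String × String => q.2) q = q := by
    intro q hq
    have : q.1 = f := by simpa using (List.mem_filter.mp hq).2
    simp [Function.comp, ← this]
  rw [List.map_congr_left this]; simp

theorem pv_count_flat (L : List (String × String)) (ks : List String) (hnd : ks.Nodup)
    (p : String × String) :
    (ks.flatMap (fun f => L.filter (fun q => q.1 == f))).count p
      = if p.1 ∈ ks then L.count p else 0 := by
  induction ks with
  | nil => simp
  | cons f t ih =>
    simp only [List.flatMap_cons, List.count_append, List.mem_cons]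
    by_cases hp : p.1 = f
    · have h1 : (L.filter (fun q => q.1 == f)).count p = L.count p :=
        List.count_filter (by simp [hp])
      have h2 : p.1 ∉ t := by rw [hp]; exact (List.nodup_cons.mp hnd).1
      rw [h1, ih (List.nodup_cons.mp hnd).2, if_neg h2, if_pos (Or.inl hp)]; simp
    · have h1 : (L.filter (fun q => q.1 == f)).count p = 0 := by
        rw [List.count_eq_zero]
        intro hmem
        exact hp (by simpa using (List.mem_filter.mp hmem).2)
      rw [h1, ih (List.nodup_cons.mp hnd).2]
      by_cases ht : p.1 ∈ t <;> simp [ht, hp]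

theorem pv_flat_perm (L : List (String × String)) :
    ((pvKeysOf L).flatMap (fun f => L.filter (fun q => q.1 == f))).Perm L := by
  rw [List.perm_iff_count]
  intro p
  rw [pv_count_flat L (pvKeysOf L) (pvKeysOf_nodup L) p]
  by_cases hp : p ∈ L
  · rw [if_pos ((pvKeysOf_mem L p.1).mpr (List.mem_map_of_mem hp))]
  · by_cases hk : p.1 ∈ pvKeysOf L <;> simp [hk, List.count_eq_zero.mpr hp]

def pvPairsOf (L : List (String × String)) : List (String × String) :=
  (pvSK L).flatMap (fun f => (pvWs L f).map (fun s => (f, s)))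

theorem pvPairsOf_perm (L : List (String × String)) : (pvPairsOf L).Perm L := by
  have h1 : (pvPairsOf L).Perm
      ((pvKeysOf L).flatMap (fun f => L.filter (fun q => q.1 == f))) := by
    refine List.Perm.flatMap (PySem.List.sorted_perm (pvKeysOf L) (fun x => x) false) ?_
    intro f _
    rw [← pvGp_repair L f]
    exact (PySem.List.sorted_perm (pvGp L f) (fun x => x) false).map _
  exact h1.trans (pv_flat_perm L)

theorem pv_flat_pairwise (L : List (String × String))
    (h : (L.map (fun q => q.2)).Nodup) :
    ∀ ks : List String, ks.Pairwise (· < ·) →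
    (ks.flatMap (fun f => (pvWs L f).map (fun s => (f, s)))).Pairwise
      (fun a b => pvLtp a b = true) := by
  intro ks
  induction ks with
  | nil => intro _; simp
  | cons f t ih =>
    intro hsk
    simp only [List.flatMap_cons]
    rw [List.pairwise_append]
    refine ⟨?_, ih hsk.tail, ?_⟩
    · refine List.Pairwise.map _ ?_ (pvWs_pairwise L h f)
      intro a b hab
      exact pvLtp_of_snd rfl hab
    · intro a ha b hb
      obtain ⟨sa, hsa, rfl⟩ := List.mem_map.mp ha
      obtain ⟨g, hg, hbb⟩ := List.mem_flatMap.mp hb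
      obtain ⟨sb, hsb, rfl⟩ := List.mem_map.mp hbb
      exact pvLtp_of_fst (List.rel_of_pairwise_cons hsk hg)

theorem pvPairsOf_pairwise (L : List (String × String))
    (h : (L.map (fun q => q.2)).Nodup) :
    (pvPairsOf L).Pairwise (fun a b => pvLtp a b = true) :=
  pv_flat_pairwise L h (pvSK L) (pvSK_pairwise L)

theorem pv_pairs_eq (L : List (String × String)) (h : (L.map (fun q => q.2)).Nodup) :
    PySem.List.sorted2 L (fun q => q.1) (fun q => q.2) false = pvPairsOf L :=
  pv_sorted2_eq L (pvPairsOf L) (pvPairsOf_perm L) (pvPairsOf_pairwise L h)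

-- B's grouping pass
def pvBodyB (st : List String × Option String) (q : String × String) :
    List String × Option String :=
  if st.2 ≠ some q.1 then (st.1 ++ [q.1 ++ "/", "  " ++ q.2], some q.1)
  else (st.1 ++ ["  " ++ q.2], st.2)

theorem pv_foldB_group (f : String) (fs : List String) :
    ∀ acc : List String,
    (fs.map (fun s => (f, s))).foldl pvBodyB (acc, some f)
      = (acc ++ fs.map (fun s => "  " ++ s), some f) := by
  induction fs with
  | nil => intro acc; simp
  | cons s t ih =>
    intro acc
    simp only [List.map_cons, List.foldl_cons]
    rw [show pvBodyB (acc, some f) (f, s) = (acc ++ ["  " ++ s], some f) from by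
      simp [pvBodyB]]
    rw [ih]
    simp

theorem pv_foldB_flat (L : List (String × String)) :
    ∀ ks : List String, ks.Pairwise (· < ·) → (∀ g ∈ ks, pvGp L g ≠ []) →
    ∀ (acc : List String) (prev : Option String), (∀ g ∈ ks, prev ≠ some g) →
    (ks.flatMap (fun f => (pvWs L f).map (fun s => (f, s)))).foldl pvBodyB (acc, prev)
      = (acc ++ ks.flatMap
          (fun f => (f ++ "/") :: (pvWs L f).map (fun s => "  " ++ s)),
         ks.foldl (fun _ g => some g) prev) := by
  intro ks
  induction ks with
  | nil => intro _ _ acc prev _; simp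
  | cons f t ih =>
    intro hks hne acc prev hprev
    have hwne : pvWs L f ≠ [] := by
      unfold pvWs
      rw [Ne, PySem.List.sorted_eq_nil_iff]
      exact hne f List.mem_cons_self
    obtain ⟨s0, ss, hws⟩ : ∃ s0 ss, pvWs L f = s0 :: ss := by
      cases hw : pvWs L f with
      | nil => exact absurd hw hwne
      | cons a b => exact ⟨a, b, rfl⟩
    simp only [List.flatMap_cons, List.foldl_append, hws, List.map_cons, List.foldl_cons]
    rw [show pvBodyB (acc, prev) (f, s0) = (acc ++ [f ++ "/", "  " ++ s0], some f) from by
      simp [pvBodyB, hprev f List.mem_cons_self]]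
    rw [pv_foldB_group, ih hks.tail
      (fun g hg => hne g (List.mem_cons_of_mem _ hg)) _ (some f)
      (fun g hg hfg => absurd (by injection hfg)
        (ne_of_lt (List.rel_of_pairwise_cons hks hg)))]
    simp

theorem pv_main (L : List (String × String)) (h : (L.map (fun q => q.2)).Nodup) :
    (PySem.List.sorted (pvGfold L).items (fun q => q.1) false).foldl
      (fun lines q =>
        (PySem.List.sorted q.2 (fun x => x) false).foldl
          (fun ls f => ls ++ ["  " ++ f]) (lines ++ [q.1 ++ "/"]))
      []
    =
    ((PySem.List.sorted2 L (fun q => q.1) (fun q => q.2) false).foldl pvBodyB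
      ([], none)).1 := by
  rw [pv_sortedItems, pv_linesA_fold, pv_pairs_eq L h]
  unfold pvPairsOf
  rw [pv_foldB_flat L (pvSK L) (pvSK_pairwise L) ?hne [] none (by simp)]
  · simp [pvWs]
  case hne =>
    intro g hg
    have hmem : g ∈ L.map (fun q => q.1) :=
      (pvKeysOf_mem L g).mp ((PySem.List.sorted_perm _ _ _).mem_iff.mp hg)
    obtain ⟨q, hq, rfl⟩ := List.mem_map.mp hmem
    intro hnil
    have : q.2 ∈ pvGp L q.1 := by
      unfold pvGp
      exact List.mem_map_of_mem (List.mem_filter.mpr ⟨hq, by simp⟩)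
    rw [hnil] at this
    exact absurd this (List.not_mem_nil)

-- ===== VERDICT (by name: the statement is the Claim_ definition above) =====
theorem format_ground_truth_structure_py_spec : Claim_equal_format_ground_truth_structure_py := by
  intro gt _ _
  unfold Spec_format_ground_truth_structure_py
  unfold format_ground_truth_structure_py format_ground_truth_structure_py_alt
  dsimp only
  generalize (PySem.Dict.ofList gt).getD "files" [] = raw
  have hnd : (((PySem.Dict.ofList raw).items.map
      (fun p => ((PySem.Dict.ofList p.2).getD "expected_folder" "", p.1))).map
      (fun q => q.2)).Nodup := by
    rw [List.map_map]
    exact PySem.Dict.nodup_keys_ofList raw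
  have hfold : (PySem.Dict.ofList raw).items.foldl
      (fun d p =>
        d.modify ((PySem.Dict.ofList p.2).getD "expected_folder" "") [] (fun fs => fs ++ [p.1]))
      PySem.Dict.empty
      = pvGfold ((PySem.Dict.ofList raw).items.map
          (fun p => ((PySem.Dict.ofList p.2).getD "expected_folder" "", p.1))) := by
    unfold pvGfold
    rw [List.foldl_map]
  rw [hfold]
  have hbody : (fun (st : List String × Option String) (q : String × String) =>
      if st.2 ≠ some q.1 then (st.1 ++ [q.1 ++ "/", "  " ++ q.2], some q.1)
      else (st.1 ++ ["  " ++ q.2], st.2)) = pvBodyB := rfl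
  rw [hbody]
  exact congrArg (PySem.Str.join "\n") (pv_main _ hnd)
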